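-- pv_equiv track=rewrite | github.com/Marco-Oosthuizen/support_scheduler | dev_utilities.py | get_available_devs_per_slot
-- ===== SOURCE A (Python) =====
-- def get_available_devs_per_slot(total_slots, dev_availability_matrix):
--     available_devs_per_slot = {}
--     for dev, slots in dev_availability_matrix.items():
--         for slot in slots:
--             if slot not in available_devs_per_slot:
--                 available_devs_per_slot[slot] = []
--             available_devs_per_slot[slot].append(dev)
--     available_devs_per_slot_sorted_by_slot = {}
--     first_slot = 0
--     last_slot = total_slots - 1
--
--     for slot in range(first_slot, last_slot + 1):
--         available_devs_per_slot_sorted_by_slot[slot] = available_devs_per_slot.get(slot, [])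
--
--     return available_devs_per_slot_sorted_by_slot
-- ===== SOURCE B (Python) =====
-- def get_available_devs_per_slot(total_slots, dev_availability_matrix):
--     return {
--         slot: [dev for dev, slots in dev_availability_matrix.items()
--                    for s in slots if s == slot]
--         for slot in range(total_slots)
--     }
-- ===== Notes on version B (the rewrite author's own statement) =====
-- stated objective: alternative
-- what changed: B drops A's intermediate inverted index and its two-phase build: a single dict comprehension over range(total_slots) computes each slot's dev list directly by an occurrence-level scan of the matrix.
import Mathlib
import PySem

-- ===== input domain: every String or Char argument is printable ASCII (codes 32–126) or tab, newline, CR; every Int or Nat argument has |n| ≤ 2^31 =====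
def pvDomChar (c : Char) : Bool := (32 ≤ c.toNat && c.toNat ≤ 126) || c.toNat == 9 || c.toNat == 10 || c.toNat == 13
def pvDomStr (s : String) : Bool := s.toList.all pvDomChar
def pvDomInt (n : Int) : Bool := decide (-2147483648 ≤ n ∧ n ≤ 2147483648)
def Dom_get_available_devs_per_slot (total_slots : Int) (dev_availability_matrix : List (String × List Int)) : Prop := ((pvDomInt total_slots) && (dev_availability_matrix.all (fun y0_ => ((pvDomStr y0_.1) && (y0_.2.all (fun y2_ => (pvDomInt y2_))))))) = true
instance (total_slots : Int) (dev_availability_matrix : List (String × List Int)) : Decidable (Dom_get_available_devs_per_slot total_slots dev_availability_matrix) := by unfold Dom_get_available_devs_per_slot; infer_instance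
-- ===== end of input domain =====

-- B replaces A's two-phase inverted-index build with a direct per-slot scan of the matrix
-- (a single dict comprehension over range(total_slots)); a genuinely different decomposition, not faster.

-- ===== PORT A =====
-- inner loop body of A: "if slot not in d: d[slot] = []" then "d[slot].append(dev)"
def pvStepA (dev : String) (d : PySem.Dict Int (List String)) (slot : Int) : PySem.Dict Int (List String) :=
  let d' := if d.contains slot then d else d.insert slot []
  d'.modify slot [] (fun l => l ++ [dev])

def get_available_devs_per_slot (total_slots : Int) (dev_availability_matrix : List (String × List Int)) : List (Int × List String) :=
  let available_devs_per_slot : PySem.Dict Int (List String) :=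
    dev_availability_matrix.foldl (fun d p => p.2.foldl (pvStepA p.1) d) PySem.Dict.empty
  let first_slot : Int := 0
  let last_slot : Int := total_slots - 1
  let sorted : PySem.Dict Int (List String) :=
    (PySem.List.pyRange first_slot (last_slot + 1) 1).foldl
      (fun r slot => r.insert slot (available_devs_per_slot.getD slot [])) PySem.Dict.empty
  sorted.items

-- ===== PORT B =====
def get_available_devs_per_slot_alt (total_slots : Int) (dev_availability_matrix : List (String × List Int)) : List (Int × List String) :=
  (PySem.List.pyRange 0 total_slots 1).map (fun slot =>
    (slot, dev_availability_matrix.flatMap (fun p =>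
      (p.2.filter (fun s => s == slot)).map (fun _ => p.1))))

-- ===== PRECONDITION & SPEC =====
def Spec_get_available_devs_per_slot (total_slots : Int) (dev_availability_matrix : List (String × List Int)) (out : List (Int × List String)) : Prop := out = get_available_devs_per_slot_alt total_slots dev_availability_matrix
instance (total_slots : Int) (dev_availability_matrix : List (String × List Int)) (out : List (Int × List String)) : Decidable (Spec_get_available_devs_per_slot total_slots dev_availability_matrix out) := by unfold Spec_get_available_devs_per_slot; infer_instance

-- ===== CLAIM (what is proved, stated in full; the proofs are below) =====
def Claim_equal_get_available_devs_per_slot : Prop := ∀ (total_slots : Int) (dev_availability_matrix : List (String × List Int)), Dom_get_available_devs_per_slot total_slots dev_availability_matrix → Spec_get_available_devs_per_slot total_slots dev_availability_matrix (get_available_devs_per_slot total_slots dev_availability_matrix)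

-- ===== LEMMAS AND PROOFS =====

lemma pvStepA_getD (dev : String) (d : PySem.Dict Int (List String)) (slot c : Int) :
    (pvStepA dev d slot).getD c [] = if c = slot then d.getD c [] ++ [dev] else d.getD c [] := by
  unfold pvStepA
  by_cases hc : d.contains slot
  · simp only [hc, if_true, PySem.Dict.getD_modify]
    split_ifs with h
    · subst h; rfl
    · rfl
  · simp only [hc, if_false, Bool.false_eq_true, PySem.Dict.getD_modify]
    by_cases hcs : c = slot
    · subst hcs
      rw [PySem.Dict.getD_insert_self, PySem.Dict.getD_of_not_contains d ([] : List String) (by simpa using hc)]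
    · simp only [hcs, if_false]
      exact PySem.Dict.getD_insert_of_ne d _ _ hcs

lemma pvInner_getD (dev : String) (slots : List Int) (d : PySem.Dict Int (List String)) (c : Int) :
    (slots.foldl (pvStepA dev) d).getD c []
      = d.getD c [] ++ (slots.filter (fun s => s == c)).map (fun _ => dev) := by
  induction slots generalizing d with
  | nil => simp
  | cons s rest ih =>
    simp only [List.foldl_cons, List.filter_cons]
    rw [ih, pvStepA_getD]
    by_cases h : s = c
    · subst h; simp
    · have h' : c ≠ s := fun e => h e.symm
      simp [h, h']

lemma pvBuild_getD (m : List (String × List Int)) (d : PySem.Dict Int (List String)) (c : Int) :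
    (m.foldl (fun d p => p.2.foldl (pvStepA p.1) d) d).getD c []
      = d.getD c [] ++ m.flatMap (fun p => (p.2.filter (fun s => s == c)).map (fun _ => p.1)) := by
  induction m generalizing d with
  | nil => simp
  | cons p rest ih =>
    simp only [List.foldl_cons, List.flatMap_cons]
    rw [ih, pvInner_getD, List.append_assoc]

-- ===== VERDICT (by name: the statement is the Claim_ definition above) =====
theorem get_available_devs_per_slot_spec : Claim_equal_get_available_devs_per_slot := by
  intro total_slots m _
  unfold Spec_get_available_devs_per_slot get_available_devs_per_slot get_available_devs_per_slot_alt
  simp only [sub_add_cancel]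
  have h := PySem.Dict.items_foldl_insert_fresh (PySem.List.pyRange 0 total_slots 1)
        (fun a => a)
        (fun slot => ((m.foldl (fun d p => p.2.foldl (pvStepA p.1) d) PySem.Dict.empty).getD slot []))
        PySem.Dict.empty
        (by intro a _; exact PySem.Dict.contains_empty a)
        (by simpa using PySem.List.nodup_pyRange_one 0 total_slots)
  simp only at h
  rw [h]
  have hemp : (PySem.Dict.empty : PySem.Dict Int (List String)).items = [] := rfl
  rw [hemp, List.nil_append]
  apply List.map_congr_left
  intro slot _
  rw [pvBuild_getD]
  simp
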